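-- pv_equiv track=rewrite | github.com/kennethortega-myt/scePr24 | sce-models-api/sce-models-api-develop/models/digitsdetector.py | _obtener_rectangulo_fusionado
-- ===== SOURCE A (Python) =====
-- def _obtener_rectangulo_fusionado(contornos):
--     x_vals = [x for x, _, _, _ in contornos]
--     y_vals = [y for _, y, _, _ in contornos]
--     x2_vals = [x + w for x, _, w, _ in contornos]
--     y2_vals = [y + h for _, y, _, h in contornos]
--     x = min(x_vals)
--     y = min(y_vals)
--     w = max(x2_vals) - x
--     h = max(y2_vals) - y
--     return (x, y, w, h)
-- ===== SOURCE B (Python) =====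
-- def _obtener_rectangulo_fusionado(contornos):
--     x0, y0, w0, h0 = contornos[0]
--     min_x, min_y, max_x2, max_y2 = x0, y0, x0 + w0, y0 + h0
--     for x, y, w, h in contornos[1:]:
--         if x < min_x:
--             min_x = x
--         if y < min_y:
--             min_y = y
--         if x + w > max_x2:
--             max_x2 = x + w
--         if y + h > max_y2:
--             max_y2 = y + h
--     return (min_x, min_y, max_x2 - min_x, max_y2 - min_y)
-- ===== Notes on version B (the rewrite author's own statement) =====
-- stated objective: alternative
-- what changed: Replaced four list comprehensions plus four min/max scans (eight passes, four temporary lists) with one fused loop maintaining four running extrema.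
import Mathlib
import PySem

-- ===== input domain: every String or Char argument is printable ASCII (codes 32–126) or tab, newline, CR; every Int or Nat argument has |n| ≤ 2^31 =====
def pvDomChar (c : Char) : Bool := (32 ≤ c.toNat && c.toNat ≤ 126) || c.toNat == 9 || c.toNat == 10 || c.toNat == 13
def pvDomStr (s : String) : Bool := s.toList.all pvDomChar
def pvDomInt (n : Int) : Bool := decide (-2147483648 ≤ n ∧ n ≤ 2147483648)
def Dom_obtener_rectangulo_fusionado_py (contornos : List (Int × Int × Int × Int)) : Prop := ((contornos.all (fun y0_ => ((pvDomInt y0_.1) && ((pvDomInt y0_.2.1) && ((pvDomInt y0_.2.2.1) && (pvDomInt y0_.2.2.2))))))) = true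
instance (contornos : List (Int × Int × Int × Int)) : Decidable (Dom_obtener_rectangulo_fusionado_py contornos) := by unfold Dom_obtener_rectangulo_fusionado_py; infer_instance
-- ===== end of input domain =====

-- B fuses A's four list comprehensions + four min/max scans into one loop keeping four running extrema.


-- ===== PORT A =====
def obtener_rectangulo_fusionado_py (contornos : List (Int × Int × Int × Int)) : Int × Int × Int × Int :=
  let x_vals := contornos.map (fun t => t.1)
  let y_vals := contornos.map (fun t => t.2.1)
  let x2_vals := contornos.map (fun t => t.1 + t.2.2.1)
  let y2_vals := contornos.map (fun t => t.2.1 + t.2.2.2)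
  match PySem.List.min? x_vals (fun v => v), PySem.List.min? y_vals (fun v => v),
        PySem.List.max? x2_vals (fun v => v), PySem.List.max? y2_vals (fun v => v) with
  | some x, some y, some x2, some y2 => (x, y, x2 - x, y2 - y)
  | _, _, _, _ => (0, 0, 0, 0)   -- unreachable under Pre_ (min([]) raises ValueError)

-- ===== PORT B =====
def pvAltLoop (rest : List (Int × Int × Int × Int)) (mnx mny mxx mxy : Int) : Int × Int × Int × Int :=
  match rest with
  | [] => (mnx, mny, mxx - mnx, mxy - mny)
  | (x, y, w, h) :: t =>
      pvAltLoop t (if x < mnx then x else mnx) (if y < mny then y else mny)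
        (if x + w > mxx then x + w else mxx) (if y + h > mxy then y + h else mxy)

def obtener_rectangulo_fusionado_py_alt (contornos : List (Int × Int × Int × Int)) : Int × Int × Int × Int :=
  match contornos with
  | [] => (0, 0, 0, 0)   -- unreachable under Pre_ (contornos[0] raises IndexError)
  | (x0, y0, w0, h0) :: rest => pvAltLoop rest x0 y0 (x0 + w0) (y0 + h0)

-- ===== PRECONDITION & SPEC =====
-- A raises ValueError (min of empty sequence) on [], so Pre_ excludes the empty list.
def Pre_obtener_rectangulo_fusionado_py (contornos : List (Int × Int × Int × Int)) : Prop := contornos ≠ []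
instance (contornos : List (Int × Int × Int × Int)) : Decidable (Pre_obtener_rectangulo_fusionado_py contornos) := by unfold Pre_obtener_rectangulo_fusionado_py; infer_instance
def pvWitness_obtener_rectangulo_fusionado_py : (List (Int × Int × Int × Int)) := [(1, 2, 3, 4), (0, 5, 2, 2)]
def Spec_obtener_rectangulo_fusionado_py (contornos : List (Int × Int × Int × Int)) (out : Int × Int × Int × Int) : Prop := out = obtener_rectangulo_fusionado_py_alt contornos
instance (contornos : List (Int × Int × Int × Int)) (out : Int × Int × Int × Int) : Decidable (Spec_obtener_rectangulo_fusionado_py contornos out) := by unfold Spec_obtener_rectangulo_fusionado_py; infer_instance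

-- ===== CLAIM (what is proved, stated in full; the proofs are below) =====
def Claim_equal_obtener_rectangulo_fusionado_py : Prop := ∀ (contornos : List (Int × Int × Int × Int)), Dom_obtener_rectangulo_fusionado_py contornos → Pre_obtener_rectangulo_fusionado_py contornos → Spec_obtener_rectangulo_fusionado_py contornos (obtener_rectangulo_fusionado_py contornos)

-- ===== LEMMAS AND PROOFS =====
-- Loop invariant: pvAltLoop computes the four running extrema as folds over the mapped lists.
theorem pvAltLoop_eq (rest : List (Int × Int × Int × Int)) : ∀ (mnx mny mxx mxy : Int),
    pvAltLoop rest mnx mny mxx mxy =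
      ((rest.map (fun t => t.1)).foldl min mnx,
       (rest.map (fun t => t.2.1)).foldl min mny,
       (rest.map (fun t => t.1 + t.2.2.1)).foldl max mxx -
         (rest.map (fun t => t.1)).foldl min mnx,
       (rest.map (fun t => t.2.1 + t.2.2.2)).foldl max mxy -
         (rest.map (fun t => t.2.1)).foldl min mny) := by
  induction rest with
  | nil => intro mnx mny mxx mxy; simp [pvAltLoop]
  | cons p t ih =>
      intro mnx mny mxx mxy
      obtain ⟨x, y, w, h⟩ := p
      have h1 : (if x < mnx then x else mnx) = min mnx x := by rw [min_def]; split_ifs <;> omega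
      have h2 : (if y < mny then y else mny) = min mny y := by rw [min_def]; split_ifs <;> omega
      have h3 : (if x + w > mxx then x + w else mxx) = max mxx (x + w) := by
        rw [max_def]; split_ifs <;> omega
      have h4 : (if y + h > mxy then y + h else mxy) = max mxy (y + h) := by
        rw [max_def]; split_ifs <;> omega
      simp only [pvAltLoop, h1, h2, h3, h4, ih, List.map_cons, List.foldl_cons]

-- ===== VERDICT (by name: the statement is the Claim_ definition above) =====
theorem obtener_rectangulo_fusionado_py_spec : Claim_equal_obtener_rectangulo_fusionado_py := by
  intro contornos _ hpre
  unfold Spec_obtener_rectangulo_fusionado_py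
  match contornos with
  | [] => exact absurd rfl hpre
  | (x0, y0, w0, h0) :: rest =>
      simp only [obtener_rectangulo_fusionado_py, obtener_rectangulo_fusionado_py_alt,
        List.map_cons, PySem.List.min?_id_cons, PySem.List.max?_id_cons, pvAltLoop_eq]
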